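-- pv_equiv track=rewrite | github.com/jung-yeon/-algorithm_Baekjoon_programmers | 프로그래머스/unrated/181918. 배열 만들기 4/배열 만들기 4.py | solution
-- ===== SOURCE A (Python) =====
-- def solution(arr):
--     stk = []
--     i = 0
--     while i < len(arr):
--         if len(stk) == 0:
--             stk.append(arr[i])
--             i += 1
--         else:
--             lastNum = stk[len(stk) - 1]
--             if lastNum < arr[i]:
--                 stk.append(arr[i])
--                 i += 1
--             else:
--                 stk.pop()
--     return stk
-- ===== SOURCE B (Python) =====
-- def solution(arr):
--     # Keep exactly the elements strictly smaller than everything to their right: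
--     # one backward pass with a running minimum, then reverse.
--     res = []
--     m = None
--     for x in reversed(arr):
--         if m is None or x < m:
--             res.append(x)
--             m = x
--     res.reverse()
--     return res
-- ===== Notes on version B (the rewrite author's own statement) =====
-- stated objective: faster
-- what changed: Replaced the while-loop monotonic stack (with re-examining indices on pops) by a single right-to-left pass keeping elements strictly below the running suffix minimum.
import Mathlib
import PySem

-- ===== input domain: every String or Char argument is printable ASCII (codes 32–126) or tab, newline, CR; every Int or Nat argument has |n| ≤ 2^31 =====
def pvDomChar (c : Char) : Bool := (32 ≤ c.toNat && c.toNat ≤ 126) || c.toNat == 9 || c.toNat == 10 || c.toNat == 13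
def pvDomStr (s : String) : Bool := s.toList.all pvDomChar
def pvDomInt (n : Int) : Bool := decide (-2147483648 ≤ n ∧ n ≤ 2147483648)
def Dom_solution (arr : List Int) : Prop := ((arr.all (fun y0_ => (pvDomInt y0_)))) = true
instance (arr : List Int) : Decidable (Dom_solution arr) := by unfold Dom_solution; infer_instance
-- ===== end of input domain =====

-- B replaces A's pop-on-non-increase stack loop by one backward suffix-minimum pass (same result, fewer list operations).

-- ===== PORT A =====
-- A's while loop: state (stk, i); push advances i, pop keeps i.
def solutionLoop (arr : List Int) (stk : List Int) (i : Nat) : List Int :=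
  if h : i < arr.length then
    if hs : stk = [] then
      solutionLoop arr (stk ++ [arr[i]]) (i + 1)
    else
      let lastNum := stk.getLast hs
      if lastNum < arr[i] then
        solutionLoop arr (stk ++ [arr[i]]) (i + 1)
      else
        solutionLoop arr stk.dropLast i
  else stk
termination_by (arr.length - i) * 2 + stk.length
decreasing_by
  · simp [List.length_append]; omega
  · simp [List.length_append]; omega
  · have := List.length_pos_of_ne_nil hs
    simp [List.length_dropLast]; omega

def solution (arr : List Int) : List Int := solutionLoop arr [] 0

-- ===== PORT B =====
def solution_alt (arr : List Int) : List Int :=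
  let p := arr.reverse.foldl
    (fun (p : Option Int × List Int) x =>
      match p.1 with
      | none => (some x, p.2 ++ [x])
      | some m => if x < m then (some x, p.2 ++ [x]) else p)
    ((none : Option Int), ([] : List Int))
  p.2.reverse

-- ===== PRECONDITION & SPEC =====
def Spec_solution (arr : List Int) (out : List Int) : Prop := out = solution_alt arr
instance (arr : List Int) (out : List Int) : Decidable (Spec_solution arr out) := by unfold Spec_solution; infer_instance

-- ===== CLAIM (what is proved, stated in full; the proofs are below) =====
def Claim_equal_solution : Prop := ∀ (arr : List Int), Dom_solution arr → Spec_solution arr (solution arr)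

-- ===== LEMMAS AND PROOFS =====

-- suffix minimum (none for the empty list)
def minO : List Int → Option Int
  | [] => none
  | x :: xs => some (match minO xs with | none => x | some m => min x m)

-- elements strictly smaller than everything to their right
def keep : List Int → List Int
  | [] => []
  | x :: xs =>
    match minO xs with
    | none => x :: keep xs
    | some m => if x < m then x :: keep xs else keep xs

-- A's loop with the stack reversed (top = head)
def runR : List Int → List Int → List Int
  | s, [] => s
  | s, x :: xs => runR (x :: s.dropWhile (fun t => decide (x ≤ t))) xs

def dropPred (xs : List Int) (t : Int) : Bool :=
  match minO xs with
  | none => false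
  | some m => decide (m ≤ t)

theorem dropWhile_dropWhile (p q : Int → Bool) (h : ∀ t, q t → p t) :
    ∀ s : List Int, (s.dropWhile q).dropWhile p = s.dropWhile p := by
  intro s
  induction s with
  | nil => simp
  | cons a s ih =>
    by_cases hq : q a = true
    · simp [List.dropWhile, hq, h a hq, ih]
    · simp [List.dropWhile, hq]

theorem runR_eq : ∀ (xs s : List Int),
    runR s xs = (keep xs).reverse ++ s.dropWhile (dropPred xs) := by
  intro xs
  induction xs with
  | nil =>
    intro s
    have : List.dropWhile (dropPred []) s = s := by
      induction s with
      | nil => rfl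
      | cons a s ih => simp [dropPred, minO]
    simp [runR, keep, this]
  | cons x xs ih =>
    intro s
    rw [runR, ih]
    cases hmo : minO xs with
    | none =>
      have hxs : xs = [] := by cases xs with | nil => rfl | cons a l => simp [minO] at hmo
      subst hxs
      simp only [keep, minO, List.reverse_cons, List.reverse_nil, List.nil_append]
      have : dropPred [x] = fun t => decide (x ≤ t) := rfl
      simp [this, dropPred, minO]
    | some m =>
      by_cases hx : x < m
      · have hmin : min x m = x := by omega
        have hdp : dropPred (x :: xs) = fun t => decide (x ≤ t) := by
          funext t; simp only [dropPred, minO, hmo, hmin]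
        simp only [keep, hmo, if_pos hx, List.reverse_cons, List.append_assoc]
        congr 1
        rw [hdp, List.dropWhile_cons, if_neg (by simp [dropPred, hmo]; omega)]
        rfl
      · have hle : m ≤ x := by omega
        have hmin : min x m = m := by omega
        have hdp : dropPred (x :: xs) = dropPred xs := by
          funext t; simp only [dropPred, minO, hmo, hmin]
        simp only [keep, hmo, if_neg hx]
        congr 1
        rw [hdp, List.dropWhile_cons, if_pos (by simp [dropPred, hmo, hle])]
        exact dropWhile_dropWhile _ _
          (fun t ht => by
            simp only [decide_eq_true_eq] at ht
            simp only [dropPred, hmo, decide_eq_true_eq]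
            omega) s

theorem solutionLoop_eq (arr : List Int) : ∀ stk i,
    solutionLoop arr stk i = (runR stk.reverse (arr.drop i)).reverse := by
  intro stk i
  induction stk, i using solutionLoop.induct arr with
  | case1 i h ih =>
    rw [solutionLoop]
    simp only [h, dif_pos]
    rw [ih, List.drop_eq_getElem_cons h]
    simp [runR]
  | case2 stk i h hs _ln hlt ih =>
    have hlt' : stk.getLast hs < arr[i] := hlt
    have hrev : stk.reverse = stk.getLast hs :: stk.dropLast.reverse := by
      conv_lhs => rw [← List.dropLast_append_getLast hs]
      simp
    rw [solutionLoop, dif_pos h, dif_neg hs, if_pos hlt, ih,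
      List.drop_eq_getElem_cons h, runR]
    have hdw : List.dropWhile (fun t => decide (arr[i] ≤ t)) stk.reverse
        = stk.reverse := by
      conv_lhs => rw [hrev, List.dropWhile_cons, if_neg (by simp; omega)]
      rw [← hrev]
    rw [hdw, show (stk ++ [arr[i]]).reverse = arr[i] :: stk.reverse by simp]
  | case3 stk i h hs _ln hlt ih =>
    have hlt' : ¬ stk.getLast hs < arr[i] := hlt
    have hrev : stk.reverse = stk.getLast hs :: stk.dropLast.reverse := by
      conv_lhs => rw [← List.dropLast_append_getLast hs]
      simp
    rw [solutionLoop, dif_pos h, dif_neg hs, if_neg hlt, ih]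
    congr 1
    rw [List.drop_eq_getElem_cons h, runR, runR, hrev, List.dropWhile_cons,
      if_pos (by simp; omega)]
  | case4 stk i h =>
    rw [solutionLoop]
    have hd : List.drop i arr = [] := List.drop_eq_nil_of_le (by omega)
    simp [h, hd, runR]

theorem solution_eq_keep (arr : List Int) : solution arr = keep arr := by
  have h := solutionLoop_eq arr [] 0
  simp only [solution, h, List.reverse_nil, List.drop_zero, runR_eq]
  simp

theorem foldl_alt (xs : List Int) :
    xs.reverse.foldl
      (fun (p : Option Int × List Int) x =>
        match p.1 with
        | none => (some x, p.2 ++ [x])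
        | some m => if x < m then (some x, p.2 ++ [x]) else p)
      ((none : Option Int), ([] : List Int)) = (minO xs, (keep xs).reverse) := by
  induction xs with
  | nil => simp [minO, keep]
  | cons x xs ih =>
    rw [List.reverse_cons, List.foldl_append, ih]
    cases hmo : minO xs with
    | none =>
      have hxs : xs = [] := by cases xs with | nil => rfl | cons a l => simp [minO] at hmo
      subst hxs
      simp [minO, keep]
    | some m =>
      by_cases hx : x < m
      · have hmin : min x m = x := by omega
        simp [keep, minO, hmo, hx, hmin]
      · have hmin : min x m = m := by omega
        simp [keep, minO, hmo, hx, hmin]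

theorem solution_alt_eq_keep (arr : List Int) : solution_alt arr = keep arr := by
  show (arr.reverse.foldl
    (fun (p : Option Int × List Int) x =>
      match p.1 with
      | none => (some x, p.2 ++ [x])
      | some m => if x < m then (some x, p.2 ++ [x]) else p)
    ((none : Option Int), ([] : List Int))).2.reverse = keep arr
  rw [foldl_alt]
  simp

-- ===== VERDICT (by name: the statement is the Claim_ definition above) =====
theorem solution_spec : Claim_equal_solution := by
  intro arr _
  unfold Spec_solution
  rw [solution_eq_keep, solution_alt_eq_keep]
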